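-- pv_equiv track=rewrite | github.com/BjornMelin/ai-docs-vector-db-hybrid-scraper | scripts/add_respx_mocking.py | add_respx_import
-- ===== SOURCE A (Python) =====
-- from typing import List, Tuple
--
-- def add_respx_import(content: str) -> Tuple[str, bool]:
--     """Add respx import if not present."""
--     if "import respx" in content or "from respx import" in content:
--         return content, False
--
--     lines = content.split('\n')
--     import_added = False
--
--     # Find where to add the import
--     for i, line in enumerate(lines):
--         if line.startswith('import pytest') or line.startswith('from unittest'):
--             # Add respx import after pytest or unittest imports
--             lines.insert(i + 1, "import respx")
--             import_added = True
--             break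
--
--     if not import_added:
--         # Add at the beginning after docstring
--         for i, line in enumerate(lines):
--             if not line.startswith('"""') and not line.startswith('#') and line.strip():
--                 lines.insert(i, "import respx\n")
--                 import_added = True
--                 break
--
--     return '\n'.join(lines), import_added
-- ===== SOURCE B (Python) =====
-- def add_respx_import(content):
--     """Add respx import if not present (single scan recording both candidate positions)."""
--     if "import respx" in content or "from respx import" in content:
--         return content, False
--
--     lines = content.split('\n')
--     import_idx = None
--     content_idx = None
--     for i, line in enumerate(lines):
--         if line.startswith('import pytest') or line.startswith('from unittest'):
--             import_idx = i
--             break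
--         if content_idx is None and not line.startswith('"""') and not line.startswith('#') and line.strip():
--             content_idx = i
--
--     if import_idx is not None:
--         new_lines = lines[:import_idx + 1] + ["import respx"] + lines[import_idx + 1:]
--         return '\n'.join(new_lines), True
--     if content_idx is not None:
--         new_lines = lines[:content_idx] + ["import respx\n"] + lines[content_idx:]
--         return '\n'.join(new_lines), True
--     return '\n'.join(lines), False
-- ===== Notes on version B (the rewrite author's own statement) =====
-- stated objective: alternative
-- what changed: Replaces A's two sequential scans that mutate the list via insert with a single early-stopping scan that records both candidate indices (first pytest/unittest import line, first non-docstring non-comment non-blank line) and then rebuilds the output once by list slicing.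
import Mathlib
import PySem

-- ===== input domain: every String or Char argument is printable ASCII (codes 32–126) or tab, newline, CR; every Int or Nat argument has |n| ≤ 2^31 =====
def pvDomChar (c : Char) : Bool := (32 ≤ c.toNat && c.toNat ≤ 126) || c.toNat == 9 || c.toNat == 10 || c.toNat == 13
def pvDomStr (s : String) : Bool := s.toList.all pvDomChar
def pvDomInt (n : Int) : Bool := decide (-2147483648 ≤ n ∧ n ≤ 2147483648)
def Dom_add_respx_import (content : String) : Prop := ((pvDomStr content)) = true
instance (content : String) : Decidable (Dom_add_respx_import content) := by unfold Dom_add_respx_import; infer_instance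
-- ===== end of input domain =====

-- B replaces A's two mutating scans with one early-stopping scan recording both candidate
-- insertion indices, then rebuilds the line list once by slicing (objective: alternative).

-- shared helpers: the two line tests both Pythons write inline
-- "line.startswith('import pytest') or line.startswith('from unittest')"
def pvImp (l : String) : Bool :=
  PySem.Str.startswith l "import pytest" || PySem.Str.startswith l "from unittest"

-- "not line.startswith('\"\"\"') and not line.startswith('#') and line.strip()"
def pvCont (l : String) : Bool :=
  !PySem.Str.startswith l "\"\"\"" && !PySem.Str.startswith l "#" && (PySem.Str.strip l != "")

-- ===== PORT A =====
-- first loop of A: on the first pytest/unittest import line, insert "import respx" after it and break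
def aLoop1 (lines : List String) : Option (List String) :=
  match lines with
  | [] => none
  | l :: rest =>
    if pvImp l then some (l :: "import respx" :: rest)
    else (aLoop1 rest).map (l :: ·)

-- second loop of A: on the first non-docstring, non-comment, non-blank line, insert "import respx\n" before it and break
def aLoop2 (lines : List String) : Option (List String) :=
  match lines with
  | [] => none
  | l :: rest =>
    if pvCont l then some ("import respx\n" :: l :: rest)
    else (aLoop2 rest).map (l :: ·)

def add_respx_import (content : String) : String × Bool :=
  if PySem.Str.isIn "import respx" content || PySem.Str.isIn "from respx import" content then
    (content, false)
  else
    -- content.split('\n'); the separator is non-empty so split? never returns none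
    let lines := (PySem.Str.split? content "\n").getD []
    match aLoop1 lines with
    | some ls => (PySem.Str.join "\n" ls, true)
    | none =>
      match aLoop2 lines with
      | some ls => (PySem.Str.join "\n" ls, true)
      | none => (PySem.Str.join "\n" lines, false)

-- ===== PORT B =====
-- B's single loop: returns (import_idx, content_idx) after the early-stopping scan
def bScan (lines : List String) (i : Nat) (cidx : Option Nat) : Option Nat × Option Nat :=
  match lines with
  | [] => (none, cidx)
  | l :: rest =>
    if pvImp l then (some i, cidx)
    else bScan rest (i + 1) (if cidx.isNone && pvCont l then some i else cidx)

def add_respx_import_alt (content : String) : String × Bool :=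
  if PySem.Str.isIn "import respx" content || PySem.Str.isIn "from respx import" content then
    (content, false)
  else
    let lines := (PySem.Str.split? content "\n").getD []
    match bScan lines 0 none with
    | (some k, _) => (PySem.Str.join "\n" (lines.take (k + 1) ++ ["import respx"] ++ lines.drop (k + 1)), true)
    | (none, some c) => (PySem.Str.join "\n" (lines.take c ++ ["import respx\n"] ++ lines.drop c), true)
    | (none, none) => (PySem.Str.join "\n" lines, false)

-- ===== PRECONDITION & SPEC =====
def Spec_add_respx_import (content : String) (out : String × Bool) : Prop := out = add_respx_import_alt content
instance (content : String) (out : String × Bool) : Decidable (Spec_add_respx_import content out) := by unfold Spec_add_respx_import; infer_instance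

-- ===== CLAIM (what is proved, stated in full; the proofs are below) =====
def Claim_equal_add_respx_import : Prop := ∀ (content : String), Dom_add_respx_import content → Spec_add_respx_import content (add_respx_import content)

-- ===== LEMMAS AND PROOFS =====

def pvCUpd (ls : List String) (i0 : Nat) (c0 : Option Nat) : Option Nat :=
  match c0 with
  | some c => some c
  | none => (ls.findIdx? pvCont).map (i0 + ·)

theorem aLoop1_eq (lines : List String) :
    aLoop1 lines = (lines.findIdx? pvImp).map
      (fun k => lines.take (k + 1) ++ ["import respx"] ++ lines.drop (k + 1)) := by
  induction lines with
  | nil => simp [aLoop1]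
  | cons l rest ih =>
    cases h : pvImp l <;> cases hi : rest.findIdx? pvImp <;>
      simp [aLoop1, h, hi, List.findIdx?_cons, ih]

theorem aLoop2_eq (lines : List String) :
    aLoop2 lines = (lines.findIdx? pvCont).map
      (fun k => lines.take k ++ ["import respx\n"] ++ lines.drop k) := by
  induction lines with
  | nil => simp [aLoop2]
  | cons l rest ih =>
    cases h : pvCont l <;> cases hi : rest.findIdx? pvCont <;>
      simp [aLoop2, h, hi, List.findIdx?_cons, ih]

theorem pvCUpd_nil (i0 : Nat) (c0 : Option Nat) : pvCUpd [] i0 c0 = c0 := by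
  cases c0 <;> simp [pvCUpd]

theorem pvCUpd_cons (l : String) (ls : List String) (i0 : Nat) (c0 : Option Nat) :
    pvCUpd (l :: ls) i0 c0 = pvCUpd ls (i0 + 1) (if c0.isNone && pvCont l then some i0 else c0) := by
  cases c0 with
  | some c => simp [pvCUpd]
  | none =>
    cases h : pvCont l <;> cases hj : ls.findIdx? pvCont <;>
      simp [pvCUpd, List.findIdx?_cons, h, hj] <;> omega

theorem bScan_eq (lines : List String) (i0 : Nat) (c0 : Option Nat) :
    bScan lines i0 c0 =
      match lines.findIdx? pvImp with
      | some k => (some (i0 + k), pvCUpd (lines.take k) i0 c0)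
      | none => (none, pvCUpd lines i0 c0) := by
  induction lines generalizing i0 c0 with
  | nil => simp [bScan, pvCUpd_nil]
  | cons l rest ih =>
    cases h : pvImp l with
    | true => simp [bScan, h, List.findIdx?_cons, pvCUpd_nil]
    | false =>
      cases hk : rest.findIdx? pvImp <;>
        simp [bScan, h, hk, List.findIdx?_cons, ih, pvCUpd_cons] <;> omega

-- ===== VERDICT (by name: the statement is the Claim_ definition above) =====
theorem add_respx_import_spec : Claim_equal_add_respx_import := by
  intro content _
  unfold Spec_add_respx_import add_respx_import add_respx_import_alt
  cases hg : (PySem.Str.isIn "import respx" content || PySem.Str.isIn "from respx import" content) with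
  | true => simp only [hg, if_pos]
  | false =>
    simp only [hg, Bool.false_eq_true, if_neg, not_false_iff]
    set lines := (PySem.Str.split? content "\n").getD [] with hl
    rw [bScan_eq, aLoop1_eq, aLoop2_eq]
    cases hk : lines.findIdx? pvImp with
    | some k => simp
    | none =>
      cases hc : lines.findIdx? pvCont with
      | some c => simp [pvCUpd, hc]
      | none => simp [pvCUpd, hc]
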